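-- pv_equiv track=rewrite | github.com/lunchRamen/coding_test | Programmers/메뉴리뉴얼.py | solution
-- ===== SOURCE A (Python) =====
-- import itertools
--
-- def solution(orders, course):
--     answer = []
--     dic=dict()
--     for order in orders:
--         length=2
--         while length<=len(order):
--             nCr=list(itertools.combinations(sorted(order),length))
--             for i in nCr:
--                 temp=''
--                 for j in i:
--                     temp+=j
--                 if temp in dic:
--                     dic[temp]+=1
--                 else:
--                     dic[temp]=1
--             length+=1
--     #key의 len이 course[i]이고, maxNum을 만들어서 각 courseLen에 맞는 maxNum을 찾음.
--     for courseLen in course: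
--         maxNum=0
--         for key in dic.keys():
--             if courseLen==len(key):
--                 if dic[key]>=maxNum and dic[key]>=2:
--                     maxNum=dic[key]
--         for key in dic.keys():
--             if dic[key]==maxNum and len(key)==courseLen:
--                 answer.append(key)
--     answer.sort()
--     return answer
-- ===== SOURCE B (Python) =====
-- import itertools
--
-- def solution(orders, course):
--     # Count combinations per requested course length directly (computing each distinct
--     # feasible length once), instead of one global dict of all lengths rescanned per course length.
--     answer = []
--     cache = {}
--     maxLen = max((len(o) for o in orders), default=0)
--     for courseLen in course:
--         if courseLen < 2 or courseLen > maxLen: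
--             continue
--         if courseLen in cache:
--             cnt = cache[courseLen]
--         else:
--             cnt = {}
--             for order in orders:
--                 if courseLen <= len(order):
--                     for combo in itertools.combinations(sorted(order), courseLen):
--                         key = ''.join(combo)
--                         cnt[key] = cnt.get(key, 0) + 1
--             cache[courseLen] = cnt
--         if cnt:
--             m = max(cnt.values())
--             if m >= 2:
--                 answer.extend(k for k, v in cnt.items() if v == m)
--     answer.sort()
--     return answer
-- ===== Notes on version B (the rewrite author's own statement) =====
-- stated objective: faster
-- what changed: B inverts the loop structure: instead of one global dict of combinations of every length 2..len(order) rescanned twice per course length, it counts combinations of each requested feasible course length directly into its own counter (cached per distinct length, lengths <2 or beyond the longest order skipped) and reads the maximum and its ties off that counter's values.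
import Mathlib
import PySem

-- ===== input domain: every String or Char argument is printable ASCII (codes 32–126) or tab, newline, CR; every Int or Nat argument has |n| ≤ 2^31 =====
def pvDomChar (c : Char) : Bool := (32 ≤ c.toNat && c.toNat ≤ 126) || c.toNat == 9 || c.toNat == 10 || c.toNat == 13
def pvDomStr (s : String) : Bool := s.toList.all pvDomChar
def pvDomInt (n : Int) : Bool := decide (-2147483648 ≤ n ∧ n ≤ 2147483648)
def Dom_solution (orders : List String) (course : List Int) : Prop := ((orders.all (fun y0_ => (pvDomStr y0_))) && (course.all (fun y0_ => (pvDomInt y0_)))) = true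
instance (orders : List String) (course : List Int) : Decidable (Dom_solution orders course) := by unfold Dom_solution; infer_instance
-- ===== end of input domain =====

-- B inverts the loop structure (objective: faster): instead of one global dict of combinations of
-- every length rescanned twice per course length, it counts combinations of each requested feasible
-- course length directly into its own counter (cached per distinct length) and reads the maximum
-- and its ties off that counter's values.

-- ===== PORT A =====
def solution (orders : List String) (course : List Int) : List String :=
  let dic : PySem.Dict String Int :=
    orders.foldl (fun dic order =>
      -- while length <= len(order), length starting at 2
      (List.range' 2 (order.toList.length - 1)).foldl (fun dic length =>
        let nCr := PySem.List.combinations (PySem.List.sorted order.toList (fun c => c)) length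
        nCr.foldl (fun dic i =>
          let temp := i.foldl (fun t j => t ++ [j]) ([] : List Char)
          let key := String.ofList temp
          if dic.contains key then dic.insert key (dic.getD key 0 + 1)
          else dic.insert key 1) dic) dic) PySem.Dict.empty
  let answer : List String :=
    course.foldl (fun answer courseLen =>
      let maxNum : Int :=
        dic.keys.foldl (fun maxNum key =>
          if courseLen = PySem.Str.len key then
            if dic.getD key 0 ≥ maxNum ∧ dic.getD key 0 ≥ 2 then dic.getD key 0 else maxNum
          else maxNum) 0
      dic.keys.foldl (fun answer key =>
        if dic.getD key 0 = maxNum ∧ PySem.Str.len key = courseLen then answer ++ [key]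
        else answer) answer) []
  PySem.List.sorted answer (fun s => s)

-- ===== PORT B =====
def solution_alt (orders : List String) (course : List Int) : List String :=
  let maxLen : Int := PySem.List.maxD (orders.map PySem.Str.len) (fun x => x) 0
  let st : List String × PySem.Dict Int (PySem.Dict String Int) :=
    course.foldl (fun st courseLen =>
      let answer := st.1
      let cache := st.2
      if courseLen < 2 ∨ maxLen < courseLen then st else
      -- cnt = cache[courseLen] if cached, else computed and stored
      let cc : PySem.Dict String Int × PySem.Dict Int (PySem.Dict String Int) :=
        if cache.contains courseLen then (cache.getD courseLen PySem.Dict.empty, cache)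
        else
          let cnt : PySem.Dict String Int :=
            orders.foldl (fun cnt order =>
              if courseLen ≤ (order.toList.length : Int) then
                (PySem.List.combinations (PySem.List.sorted order.toList (fun c => c)) courseLen.toNat).foldl
                  (fun cnt combo => cnt.insert (String.ofList combo) (cnt.getD (String.ofList combo) 0 + 1)) cnt
              else cnt) PySem.Dict.empty
          (cnt, cache.insert courseLen cnt)
      let cnt := cc.1
      let cache := cc.2
      if cnt.items.isEmpty then (answer, cache) else
      match PySem.List.max? cnt.values (fun v => v) with
      | none => (answer, cache)
      | some m =>
        if 2 ≤ m then (answer ++ (cnt.items.filter (fun p => p.2 == m)).map Prod.fst, cache)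
        else (answer, cache)) ([], PySem.Dict.empty)
  PySem.List.sorted st.1 (fun s => s)

-- ===== PRECONDITION & SPEC =====
def Spec_solution (orders : List String) (course : List Int) (out : List String) : Prop := out = solution_alt orders course
instance (orders : List String) (course : List Int) (out : List String) : Decidable (Spec_solution orders course out) := by unfold Spec_solution; infer_instance

-- ===== CLAIM (what is proved, stated in full; the proofs are below) =====
def Claim_equal_solution : Prop := ∀ (orders : List String) (course : List Int), Dom_solution orders course → Spec_solution orders course (solution orders course)

-- ===== LEMMAS AND PROOFS =====

-- the combination strings of one order at one length, and the generated key lists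
def pvGen (c : Nat) (o : String) : List String :=
  (PySem.List.combinations (PySem.List.sorted o.toList (fun x => x)) c).map String.ofList
def pvKeysOf (orders : List String) (c : Nat) : List String := orders.flatMap (pvGen c)
def pvAll (orders : List String) : List String :=
  orders.flatMap (fun o => (List.range' 2 (o.toList.length - 1)).flatMap (fun L => pvGen L o))

lemma len_mem_pvGen {k : String} {c : Nat} {o : String} (h : k ∈ pvGen c o) :
    PySem.Str.len k = (c : Int) := by
  rw [pvGen] at h
  obtain ⟨i, hi, rfl⟩ := List.mem_map.mp h
  rw [PySem.Str.len_eq, String.toList_ofList, PySem.List.length_of_mem_combinations hi]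

lemma pvGen_nil {c : Nat} {o : String} (h : o.toList.length < c) : pvGen c o = [] := by
  rw [pvGen, PySem.List.combinations_eq_nil_of_length_lt, List.map_nil]
  rw [PySem.List.length_sorted]; exact h

lemma two_le_len_mem_pvAll {orders : List String} {k : String} (h : k ∈ pvAll orders) :
    2 ≤ PySem.Str.len k := by
  rw [pvAll] at h
  obtain ⟨o, _, h⟩ := List.mem_flatMap.mp h
  obtain ⟨L, hL, h⟩ := List.mem_flatMap.mp h
  have := List.mem_range'.mp hL
  rw [len_mem_pvGen h]; omega

-- A's dict is Counter(all generated keys)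
lemma dicA_eq (orders : List String) :
    orders.foldl (fun dic order =>
      (List.range' 2 (order.toList.length - 1)).foldl (fun dic length =>
        ((PySem.List.combinations (PySem.List.sorted order.toList (fun c => c)) length).foldl
          (fun dic i =>
            let temp := i.foldl (fun t j => t ++ [j]) ([] : List Char)
            let key := String.ofList temp
            if dic.contains key then dic.insert key (dic.getD key 0 + 1)
            else dic.insert key 1) dic)) dic) PySem.Dict.empty
      = PySem.Dict.counter (pvAll orders) := by
  rw [PySem.Dict.counter_eq_foldl, pvAll, List.foldl_flatMap]
  apply PySem.List.foldl_congr_mem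
  intro d o _
  rw [List.foldl_flatMap]
  apply PySem.List.foldl_congr_mem
  intro d' L _
  rw [pvGen, List.foldl_map]
  apply PySem.List.foldl_congr_mem
  intro d'' i _
  simp only [PySem.List.foldl_append_singleton_eq_self, List.nil_append]
  by_cases h : d''.contains (String.ofList i)
  · simp [PySem.Dict.modify, PySem.Dict.getD, h]
  · simp [PySem.Dict.modify, h, PySem.Dict.getD_of_not_contains _ _ (by simpa using h)]

-- B's dict is Counter(keys of one length)
lemma cntB_eq (orders : List String) (c : Int) (h2 : 2 ≤ c) :
    orders.foldl (fun cnt order =>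
      if c ≤ (order.toList.length : Int) then
        (PySem.List.combinations (PySem.List.sorted order.toList (fun c => c)) c.toNat).foldl
          (fun cnt combo => cnt.insert (String.ofList combo) (cnt.getD (String.ofList combo) 0 + 1)) cnt
      else cnt) PySem.Dict.empty
    = PySem.Dict.counter (pvKeysOf orders c.toNat) := by
  rw [← PySem.Dict.foldl_insert_getD_add_one_eq_counter, pvKeysOf, List.foldl_flatMap]
  apply PySem.List.foldl_congr_mem
  intro d o _
  rw [pvGen, List.foldl_map]
  by_cases h : c ≤ (o.toList.length : Int)
  · rw [if_pos h]
  · rw [if_neg h, PySem.List.combinations_eq_nil_of_length_lt]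
    · simp
    · rw [PySem.List.length_sorted]; omega

lemma flatMap_single {l : List Nat} (hnd : l.Nodup) (t : Nat) (g : Nat → List String) :
    l.flatMap (fun L => if L = t then g L else []) = if t ∈ l then g t else [] := by
  induction l with
  | nil => simp
  | cons x xs ih =>
    rcases List.nodup_cons.mp hnd with ⟨hx, hnd'⟩
    simp only [List.flatMap_cons, ih hnd']
    by_cases hxt : x = t
    · subst hxt
      simp [hx]
    · simp [hxt, Ne.symm hxt]

-- the keys of length c inside all generated keys are exactly the keys generated at length c
lemma filter_pvAll (orders : List String) (c : Int) (h2 : 2 ≤ c) :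
    (pvAll orders).filter (fun k => decide (PySem.Str.len k = c)) = pvKeysOf orders c.toNat := by
  rw [pvAll, pvKeysOf, List.filter_flatMap]
  congr 1
  funext o
  rw [List.filter_flatMap]
  have hinner : ∀ L : Nat, ((pvGen L o).filter (fun k => decide (PySem.Str.len k = c)))
      = if L = c.toNat then pvGen L o else [] := by
    intro L
    split
    · next hL =>
      apply List.filter_eq_self.mpr
      intro k hk
      have := len_mem_pvGen hk
      simp only [decide_eq_true_eq, this]
      omega
    · next hL =>
      apply List.filter_eq_nil_iff.mpr
      intro k hk
      have := len_mem_pvGen hk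
      simp only [decide_eq_true_eq, this]
      omega
  simp only [hinner]
  rw [flatMap_single (List.nodup_range') c.toNat]
  split
  · rfl
  · next hmem =>
    rw [List.mem_range'_1] at hmem
    refine (pvGen_nil ?_).symm
    omega

-- counts agree between the global list and the per-length list, on keys of that length
lemma count_agree {orders : List String} {c : Int} (h2 : 2 ≤ c) {k : String}
    (hk : k ∈ pvKeysOf orders c.toNat) :
    List.count k (pvAll orders) = List.count k (pvKeysOf orders c.toNat) := by
  rw [← filter_pvAll orders c h2, List.count_filter]
  obtain ⟨o, _, h⟩ := List.mem_flatMap.mp hk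
  have := len_mem_pvGen h
  simp only [decide_eq_true_eq, this]
  omega

-- filter commutes with set-of-list
lemma set_add_filter (p : String → Bool) (s : List String) (x : String) :
    (PySem.Set.add s x).filter p = if p x then PySem.Set.add (s.filter p) x else s.filter p := by
  simp only [PySem.Set.add, PySem.Set.contains]
  by_cases hmem : x ∈ s
  · have h1 : s.contains x = true := by simpa using hmem
    rw [if_pos h1]
    by_cases hp : p x
    · have : (s.filter p).contains x = true := by
        simp only [List.contains_eq_mem, decide_eq_true_eq, List.mem_filter]
        exact ⟨hmem, hp⟩
      simp [hp, hmem]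
    · simp [hp]
  · have h1 : s.contains x = false := by simpa using hmem
    rw [if_neg (by simpa using hmem)]
    by_cases hp : p x
    · have : (s.filter p).contains x = false := by
        simp only [List.contains_eq_mem, List.mem_filter, decide_eq_false_iff_not]
        intro h; exact hmem h.1
      simp [hp, hmem, List.filter_append]
    · simp [hp, List.filter_append]

lemma set_foldl_filter (p : String → Bool) (xs : List String) : ∀ s : List String,
    (xs.foldl PySem.Set.add s).filter p = (xs.filter p).foldl PySem.Set.add (s.filter p) := by
  induction xs with
  | nil => intro s; simp
  | cons x t ih =>
    intro s
    simp only [List.foldl_cons, List.filter_cons]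
    by_cases hp : p x
    · rw [ih, set_add_filter, if_pos hp]
      simp [hp]
    · rw [ih, set_add_filter, if_neg hp]
      simp [hp]

lemma set_ofList_filter (p : String → Bool) (xs : List String) :
    (PySem.Set.ofList xs).filter p = PySem.Set.ofList (xs.filter p) := by
  simpa [PySem.Set.ofList, PySem.Set.empty] using set_foldl_filter p xs []

lemma foldl_max_eq {S : List String} (f : String → Int) {m : Int} (hm2 : 2 ≤ m)
    (hub : ∀ k ∈ S, f k ≤ m) (hex : ∃ km ∈ S, f km = m) :
    (S.filter (fun k => decide (2 ≤ f k))).foldl (fun a k => max a (f k)) 0 = m := by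
  obtain ⟨km, hkm, hfkm⟩ := hex
  have hkm' : km ∈ S.filter (fun k => decide (2 ≤ f k)) :=
    List.mem_filter.mpr ⟨hkm, by simp only [decide_eq_true_eq]; omega⟩
  have h1 := (PySem.List.le_foldl_max_int (S.filter (fun k => decide (2 ≤ f k))) f 0).2 km hkm'
  have hmem := PySem.List.foldl_max_mem ((S.filter (fun k => decide (2 ≤ f k))).map f) 0
  rw [List.foldl_map] at hmem
  rcases hmem with h | h
  · omega
  · obtain ⟨x, hxF, hxv⟩ := List.mem_map.mp h
    have := hub x (List.mem_filter.mp hxF).1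
    omega

lemma foldl_max_eq_zero {S : List String} (f : String → Int) {m : Int} (hm2 : ¬ 2 ≤ m)
    (hub : ∀ k ∈ S, f k ≤ m) :
    (S.filter (fun k => decide (2 ≤ f k))).foldl (fun a k => max a (f k)) 0 = 0 := by
  have h : S.filter (fun k => decide (2 ≤ f k)) = [] :=
    List.filter_eq_nil_iff.mpr (fun k hk => by
      have := hub k hk
      simp only [decide_eq_true_eq]
      omega)
  rw [h]
  rfl

-- A's maximum-count loop, on Counter counts, computes the running max over the ≥2-count keys of length c
lemma maxNum_eq (orders : List String) (c : Int) (h2 : 2 ≤ c) :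
    (PySem.Set.ofList (pvAll orders)).foldl (fun maxNum key =>
      if c = PySem.Str.len key then
        if ((List.count key (pvAll orders) : Int) ≥ maxNum ∧ ((List.count key (pvAll orders) : Int)) ≥ 2)
        then ((List.count key (pvAll orders)) : Int) else maxNum
      else maxNum) 0
    = ((PySem.Set.ofList (pvKeysOf orders c.toNat)).filter
        (fun k => decide (2 ≤ ((List.count k (pvKeysOf orders c.toNat)) : Int)))).foldl
        (fun a k => max a ((List.count k (pvKeysOf orders c.toNat)) : Int)) 0 := by
  rw [PySem.List.foldl_ite_eq_foldl_filter (p := fun key => c = PySem.Str.len key)]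
  have h1 : (PySem.Set.ofList (pvAll orders)).filter (fun k => decide (c = PySem.Str.len k))
      = PySem.Set.ofList (pvKeysOf orders c.toNat) := by
    rw [List.filter_congr (q := fun k => decide (PySem.Str.len k = c)) (fun k _ => by simp [eq_comm]),
        set_ofList_filter, filter_pvAll orders c h2]
  rw [h1]
  rw [PySem.List.foldl_congr_mem _ _
      (fun (m : Int) k => if 2 ≤ ((List.count k (pvKeysOf orders c.toNat)) : Int)
        then max m ((List.count k (pvKeysOf orders c.toNat)) : Int) else m) _
      (fun m k hk => by
        simp only [count_agree h2 ((PySem.Set.mem_ofList _ _).mp hk)]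
        split_ifs <;> omega)]
  rw [PySem.List.foldl_ite_eq_foldl_filter
      (p := fun k => 2 ≤ ((List.count k (pvKeysOf orders c.toNat)) : Int))]

-- A's append loop, on Counter counts, appends the keys of length c whose count is maxNum
lemma blockA_eq (orders : List String) (c : Int) (h2 : 2 ≤ c) (M : Int) :
    (PySem.Set.ofList (pvAll orders)).filter
      (fun k => decide (((List.count k (pvAll orders)) : Int) = M ∧ PySem.Str.len k = c))
    = (PySem.Set.ofList (pvKeysOf orders c.toNat)).filter
      (fun k => decide (((List.count k (pvKeysOf orders c.toNat)) : Int) = M)) := by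
  simp only [Bool.decide_and]
  rw [← List.filter_filter, set_ofList_filter, filter_pvAll orders c h2]
  exact List.filter_congr (fun k hk => by
    rw [count_agree h2 ((PySem.Set.mem_ofList _ _).mp hk)])

-- the per-course-length step of A equals the per-course-length step of B
def pvBody (ans : List String) (cnt : PySem.Dict String Int) : List String :=
  if cnt.items.isEmpty then ans else
  match PySem.List.max? cnt.values (fun v => v) with
  | none => ans
  | some m =>
    if 2 ≤ m then ans ++ (cnt.items.filter (fun p => p.2 == m)).map Prod.fst
    else ans

lemma step_eq (orders : List String) (c : Int) (ans : List String) :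
    (let dic : PySem.Dict String Int :=
       orders.foldl (fun dic order =>
         (List.range' 2 (order.toList.length - 1)).foldl (fun dic length =>
           ((PySem.List.combinations (PySem.List.sorted order.toList (fun c => c)) length).foldl
             (fun dic i =>
               let temp := i.foldl (fun t j => t ++ [j]) ([] : List Char)
               let key := String.ofList temp
               if dic.contains key then dic.insert key (dic.getD key 0 + 1)
               else dic.insert key 1) dic)) dic) PySem.Dict.empty
     let maxNum : Int :=
       dic.keys.foldl (fun maxNum key =>
         if c = PySem.Str.len key then
           if dic.getD key 0 ≥ maxNum ∧ dic.getD key 0 ≥ 2 then dic.getD key 0 else maxNum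
         else maxNum) 0
     dic.keys.foldl (fun answer key =>
       if dic.getD key 0 = maxNum ∧ PySem.Str.len key = c then answer ++ [key]
       else answer) ans)
    = if c < 2 then ans
      else pvBody ans (PySem.Dict.counter (pvKeysOf orders c.toNat)) := by
  rw [dicA_eq orders]
  simp only [PySem.Dict.keys_counter, PySem.Dict.getD_counter]
  rw [PySem.List.foldl_append_ite_eq_filter]
  by_cases hc : c < 2
  · -- no key has length c < 2: A appends nothing, B skips the length
    rw [if_pos hc]
    have hnil : ∀ M : Int, (PySem.Set.ofList (pvAll orders)).filter
        (fun k => decide (((List.count k (pvAll orders)) : Int) = M ∧ PySem.Str.len k = c)) = [] := by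
      intro M
      apply List.filter_eq_nil_iff.mpr
      intro k hk
      have := two_le_len_mem_pvAll ((PySem.Set.mem_ofList _ _).mp hk)
      simp only [decide_eq_true_eq, not_and]
      intro _
      omega
    rw [hnil, List.append_nil]
  · have h2 : (2 : Int) ≤ c := by omega
    rw [if_neg hc, maxNum_eq orders c h2, blockA_eq orders c h2]
    unfold pvBody
    simp only [PySem.Dict.items_counter, PySem.Dict.values, List.map_map]
    by_cases h0 : pvKeysOf orders c.toNat = []
    · -- no key of this length at all
      simp [h0, PySem.Set.ofList, PySem.Set.empty]
    · -- at least one key of this length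
      have hS0 : PySem.Set.ofList (pvKeysOf orders c.toNat) ≠ [] := by
        obtain ⟨k0, hk0⟩ := List.exists_mem_of_ne_nil _ h0
        intro h
        exact absurd ((PySem.Set.mem_ofList _ k0).mpr hk0) (by simp [h])
      rw [if_neg (by simp [List.isEmpty_iff, hS0])]
      cases hmax : PySem.List.max? ((PySem.Set.ofList (pvKeysOf orders c.toNat)).map
          ((fun x => x.2) ∘ fun k => (k, ((List.count k (pvKeysOf orders c.toNat)) : Int)))) (fun v => v) with
      | none =>
        exact absurd ((PySem.List.max?_eq_none_iff _ _).mp hmax) (by simp [hS0])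
      | some m =>
        dsimp only
        have hub : ∀ k ∈ PySem.Set.ofList (pvKeysOf orders c.toNat),
            ((List.count k (pvKeysOf orders c.toNat)) : Int) ≤ m :=
          fun k hk => PySem.List.max?_isMax hmax _ (List.mem_map_of_mem hk)
        by_cases hm2 : (2 : Int) ≤ m
        · rw [if_pos hm2]
          obtain ⟨km, hkmS, hkmv⟩ := List.mem_map.mp (PySem.List.max?_mem hmax)
          rw [foldl_max_eq (fun k => ((List.count k (pvKeysOf orders c.toNat)) : Int)) hm2 hub
              ⟨km, hkmS, hkmv⟩]
          congr 1
          rw [List.filter_map, List.map_map]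
          exact (List.map_id _).symm
        · rw [if_neg hm2]
          rw [foldl_max_eq_zero (fun k => ((List.count k (pvKeysOf orders c.toNat)) : Int)) hm2 hub]
          have hnil : (PySem.Set.ofList (pvKeysOf orders c.toNat)).filter
              (fun k => decide (((List.count k (pvKeysOf orders c.toNat)) : Int) = 0)) = [] := by
            apply List.filter_eq_nil_iff.mpr
            intro k hk
            have := List.count_pos_iff.mpr ((PySem.Set.mem_ofList _ _).mp hk)
            simp only [decide_eq_true_eq]
            omega
          rw [hnil, List.append_nil]

-- the first/second component of B's tail computation
lemma fst_tail (ans : List String) (cache : PySem.Dict Int (PySem.Dict String Int))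
    (cnt : PySem.Dict String Int) :
    (if cnt.items.isEmpty then (ans, cache) else
      match PySem.List.max? cnt.values (fun v => v) with
      | none => (ans, cache)
      | some m =>
        if 2 ≤ m then (ans ++ (cnt.items.filter (fun p => p.2 == m)).map Prod.fst, cache)
        else (ans, cache)).1 = pvBody ans cnt := by
  unfold pvBody
  split
  · rfl
  · cases PySem.List.max? cnt.values (fun v => v) with
    | none => rfl
    | some m => dsimp only; split <;> rfl

lemma snd_tail (ans : List String) (cache : PySem.Dict Int (PySem.Dict String Int))
    (cnt : PySem.Dict String Int) :
    (if cnt.items.isEmpty then (ans, cache) else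
      match PySem.List.max? cnt.values (fun v => v) with
      | none => (ans, cache)
      | some m =>
        if 2 ≤ m then (ans ++ (cnt.items.filter (fun p => p.2 == m)).map Prod.fst, cache)
        else (ans, cache)).2 = cache := by
  split
  · rfl
  · cases PySem.List.max? cnt.values (fun v => v) with
    | none => rfl
    | some m => dsimp only; split <;> rfl

lemma le_maxLen (orders : List String) {o : String} (ho : o ∈ orders) :
    PySem.Str.len o ≤ PySem.List.maxD (orders.map PySem.Str.len) (fun x => x) 0 := by
  unfold PySem.List.maxD
  cases hm : PySem.List.max? (orders.map PySem.Str.len) (fun x => x) with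
  | none =>
    have h := (PySem.List.max?_eq_none_iff _ _).mp hm
    rw [List.map_eq_nil_iff] at h
    subst h
    cases ho
  | some m =>
    have := PySem.List.max?_isMax hm _ (List.mem_map_of_mem ho)
    simpa using this

lemma pvKeysOf_nil_of_big (orders : List String) (c : Int) (h2 : 2 ≤ c)
    (h : PySem.List.maxD (orders.map PySem.Str.len) (fun x => x) 0 < c) :
    pvKeysOf orders c.toNat = [] := by
  rw [pvKeysOf, List.flatMap_eq_nil_iff]
  intro o ho
  apply pvGen_nil
  have hlen := le_maxLen orders ho
  rw [PySem.Str.len_eq] at hlen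
  omega

-- a loop with an extra cache accumulator computes the same answers if every step does
lemma loop_general {α β : Type} (f : α → Int → α) (g : (α × β) → Int → (α × β))
    (P : β → Prop)
    (hstep : ∀ ans cache c, P cache → f ans c = (g (ans, cache) c).1 ∧ P (g (ans, cache) c).2) :
    ∀ (course : List Int) (ans : α) (cache : β), P cache →
      course.foldl f ans = (course.foldl g (ans, cache) ).1 := by
  intro course
  induction course with
  | nil => intro ans cache _; rfl
  | cons c t ih =>
    intro ans cache hP
    obtain ⟨h1, h2⟩ := hstep ans cache c hP
    rw [List.foldl_cons, List.foldl_cons, h1]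
    have := ih (g (ans, cache) c).1 (g (ans, cache) c).2 h2
    simpa using this

-- ===== VERDICT (by name: the statement is the Claim_ definition above) =====
theorem solution_spec : Claim_equal_solution := by
  intro orders course _
  show solution orders course = solution_alt orders course
  simp only [solution, solution_alt]
  congr 1
  refine loop_general _ _
      (fun cache => ∀ L d, cache.get? L = some d → d = PySem.Dict.counter (pvKeysOf orders L.toNat))
      ?_ course [] PySem.Dict.empty (by intro L d h; simp [PySem.Dict.get?_empty] at h)
  intro ans cache c hP
  refine ⟨(step_eq orders c ans).trans ?_, ?_⟩ <;> dsimp only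
  · -- answers agree
    by_cases hskip : c < 2 ∨ PySem.List.maxD (orders.map PySem.Str.len) (fun x => x) 0 < c
    · rw [if_pos hskip]
      by_cases hc : c < 2
      · rw [if_pos hc]
      · rw [if_neg hc,
           pvKeysOf_nil_of_big orders c (by omega) (hskip.resolve_left hc)]
        rfl
    · have hc : ¬ c < 2 := fun h => hskip (Or.inl h)
      rw [if_neg hc, if_neg hskip]
      by_cases hct : cache.contains c
      · simp only [if_pos hct]
        obtain ⟨d, hd⟩ : ∃ d, cache.get? c = some d := by
          cases hq : cache.get? c with
          | none => exact absurd ((PySem.Dict.get?_eq_none_iff_contains _ _).mp hq) (by simp [hct])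
          | some d => exact ⟨d, rfl⟩
        have hgd : cache.getD c PySem.Dict.empty = PySem.Dict.counter (pvKeysOf orders c.toNat) :=
          (PySem.Dict.getD_of_get?_eq_some _ _ hd).trans (hP c d hd)
        exact ((congrArg (pvBody ans) hgd).symm.trans (fst_tail ans cache _).symm)
      · simp only [if_neg hct]
        rw [cntB_eq orders c (by omega)]
        exact (fst_tail ans _ _).symm
  · -- cache invariant is preserved
    by_cases hskip : c < 2 ∨ PySem.List.maxD (orders.map PySem.Str.len) (fun x => x) 0 < c
    · rw [if_pos hskip]; exact hP
    · rw [if_neg hskip]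
      by_cases hct : cache.contains c
      · simp only [if_pos hct]
        rw [snd_tail]
        exact hP
      · simp only [if_neg hct]
        rw [cntB_eq orders c (by omega), snd_tail]
        intro L d h
        rw [PySem.Dict.get?_insert] at h
        split at h
        · next hL => rw [hL]; exact (Option.some.injEq _ _ ▸ h).symm
        · exact hP L d h
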